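-- pv_equiv track=rewrite | github.com/dopeysboy/tsql_obfuscator | sql_obfuscator.py | increment_letter_by_one
-- ===== SOURCE A (Python) =====
-- def increment_letter_by_one(letter_seq):
--     # A is 65 Z is 90
--     # a is 97 z is 122
--     return_str = letter_seq
--
--     last_letter_ord = ord(letter_seq[-1])
--
--     if (last_letter_ord < 90 and last_letter_ord >=65) or (last_letter_ord < 122 and last_letter_ord >= 97):
--         last_letter_ord += 1
--         return_str = return_str[0:-1] + chr(last_letter_ord)
--     elif last_letter_ord == 90:
--         return_str = return_str[0:-1] + 'a'
--     elif last_letter_ord == 122: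
--         return_str = increment_letter_by_one(return_str[0:-1]) + 'A'
--
--     return return_str
-- ===== SOURCE B (Python) =====
-- def increment_letter_by_one(letter_seq):
--     # Loop from the end accumulating the carry suffix instead of recursing.
--     suffix = ''
--     s = letter_seq
--     while s and s[-1] == 'z':
--         suffix = 'A' + suffix
--         s = s[:-1]
--     if not s:
--         return suffix
--     c = ord(s[-1])
--     if 65 <= c < 90 or 97 <= c < 122:
--         return s[:-1] + chr(c + 1) + suffix
--     if c == 90:
--         return s[:-1] + 'a' + suffix
--     return s + suffix
-- ===== Notes on version B (the rewrite author's own statement) =====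
-- stated objective: alternative
-- what changed: Replaced A's recursion (strip trailing 'z', recurse, append 'A') by a single backward loop that accumulates the carry suffix and then handles the last non-'z' character in one place.
-- crash fix: On strings consisting entirely of 'z' (including the empty string) A raises IndexError when the recursion empties the string, while B returns the accumulated carry string of 'A's (e.g. 'zz' -> 'AA'). — e.g. on increment_letter_by_one("zz"): A raises IndexError, B returns "AA"
import Mathlib
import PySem

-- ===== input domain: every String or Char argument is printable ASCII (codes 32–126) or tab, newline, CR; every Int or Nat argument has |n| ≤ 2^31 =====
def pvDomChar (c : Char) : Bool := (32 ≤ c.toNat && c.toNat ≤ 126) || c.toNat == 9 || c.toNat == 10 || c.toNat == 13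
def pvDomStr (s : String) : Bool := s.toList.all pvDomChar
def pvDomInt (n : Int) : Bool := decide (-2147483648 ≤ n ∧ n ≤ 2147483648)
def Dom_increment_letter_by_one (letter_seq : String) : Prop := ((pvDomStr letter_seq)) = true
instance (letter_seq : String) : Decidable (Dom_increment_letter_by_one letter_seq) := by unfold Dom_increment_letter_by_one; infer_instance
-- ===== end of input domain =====

-- B replaces A's recursion by a backward loop with an accumulated carry suffix (alternative decomposition, same cost).

-- ===== PORT A =====
-- A's recursion over the character list: ord(s[-1]) = getLast (raises on [], guard only makes it total), s[0:-1] = dropLast.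
def incA_rec (cs : List Char) : List Char :=
  if hne : cs = [] then []  -- Python raises IndexError on ord(""[-1]); excluded by Pre_
  else
    let n := (cs.getLast hne).toNat
    if (n < 90 ∧ n ≥ 65) ∨ (n < 122 ∧ n ≥ 97) then cs.dropLast ++ [Char.ofNat (n + 1)]
    else if n = 90 then cs.dropLast ++ ['a']
    else if n = 122 then incA_rec cs.dropLast ++ ['A']
    else cs
termination_by cs.length
decreasing_by
  have := List.length_pos_of_ne_nil hne
  simp [List.length_dropLast]; omega

def increment_letter_by_one (letter_seq : String) : String :=
  String.ofList (incA_rec letter_seq.toList)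

-- ===== PORT B =====
-- B's while-loop: strip trailing 'z's, prepending 'A' to the suffix, then finish in one place.
def incB_loop (s : List Char) (suffix : List Char) : List Char :=
  if hne : s = [] then suffix
  else if s.getLast hne = 'z' then incB_loop s.dropLast ('A' :: suffix)
  else
    let n := (s.getLast hne).toNat
    if (65 ≤ n ∧ n < 90) ∨ (97 ≤ n ∧ n < 122) then s.dropLast ++ Char.ofNat (n + 1) :: suffix
    else if n = 90 then s.dropLast ++ 'a' :: suffix
    else s ++ suffix
termination_by s.length
decreasing_by
  have := List.length_pos_of_ne_nil hne
  simp [List.length_dropLast]; omega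

def increment_letter_by_one_alt (letter_seq : String) : String :=
  String.ofList (incB_loop letter_seq.toList [])

-- ===== PRECONDITION & SPEC =====
-- Pre_ excludes exactly the strings on which A raises IndexError: strings all of whose
-- characters are 'z' (including the empty string), where the recursion empties the string.
def Pre_increment_letter_by_one (letter_seq : String) : Prop :=
  (letter_seq.toList.any (fun c => c != 'z')) = true
instance (letter_seq : String) : Decidable (Pre_increment_letter_by_one letter_seq) := by
  unfold Pre_increment_letter_by_one; infer_instance

def pvWitness_increment_letter_by_one : String := "abz"

-- On strings consisting entirely of 'z' (including ""), A raises IndexError when the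
-- recursion empties the string, while B returns the accumulated carry string of 'A's.
def Raises_increment_letter_by_one (letter_seq : String) : Prop :=
  (letter_seq.toList.all (fun c => c == 'z')) = true
instance (letter_seq : String) : Decidable (Raises_increment_letter_by_one letter_seq) := by
  unfold Raises_increment_letter_by_one; infer_instance

def pvRaiseWitness_increment_letter_by_one : String := "zz"
def pvRaiseWitnessOut_increment_letter_by_one : String := "AA"

def Spec_increment_letter_by_one (letter_seq : String) (out : String) : Prop := out = increment_letter_by_one_alt letter_seq
instance (letter_seq : String) (out : String) : Decidable (Spec_increment_letter_by_one letter_seq out) := by unfold Spec_increment_letter_by_one; infer_instance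

-- ===== CLAIM (what is proved, stated in full; the proofs are below) =====
def Claim_equal_increment_letter_by_one : Prop := ∀ (letter_seq : String), Dom_increment_letter_by_one letter_seq → Pre_increment_letter_by_one letter_seq → Spec_increment_letter_by_one letter_seq (increment_letter_by_one letter_seq)

def Claim_raises_increment_letter_by_one : Prop := (∀ (letter_seq : String), Dom_increment_letter_by_one letter_seq → Raises_increment_letter_by_one letter_seq → ¬ Pre_increment_letter_by_one letter_seq) ∧ (Dom_increment_letter_by_one (pvRaiseWitness_increment_letter_by_one) ∧ Raises_increment_letter_by_one (pvRaiseWitness_increment_letter_by_one) ∧ increment_letter_by_one_alt (pvRaiseWitness_increment_letter_by_one) = pvRaiseWitnessOut_increment_letter_by_one)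

-- ===== LEMMAS AND PROOFS =====

theorem char_eq_of_toNat {c d : Char} (h : c.toNat = d.toNat) : c = d := by
  apply Char.ext
  exact UInt32.toNat_inj.mp h

theorem incA_concat (pre : List Char) (c : Char) :
    incA_rec (pre ++ [c]) =
      (if (c.toNat < 90 ∧ c.toNat ≥ 65) ∨ (c.toNat < 122 ∧ c.toNat ≥ 97) then pre ++ [Char.ofNat (c.toNat + 1)]
       else if c.toNat = 90 then pre ++ ['a']
       else if c.toNat = 122 then incA_rec pre ++ ['A']
       else pre ++ [c]) := by
  rw [incA_rec]
  simp

theorem incB_nil (suffix : List Char) : incB_loop [] suffix = suffix := by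
  rw [incB_loop]; simp

theorem incB_concat (pre : List Char) (c : Char) (suffix : List Char) :
    incB_loop (pre ++ [c]) suffix =
      (if c = 'z' then incB_loop pre ('A' :: suffix)
       else if (65 ≤ c.toNat ∧ c.toNat < 90) ∨ (97 ≤ c.toNat ∧ c.toNat < 122) then pre ++ Char.ofNat (c.toNat + 1) :: suffix
       else if c.toNat = 90 then pre ++ 'a' :: suffix
       else (pre ++ [c]) ++ suffix) := by
  rw [incB_loop]
  simp

theorem incB_eq_incA (cs : List Char) (suffix : List Char)
    (h : ∃ c ∈ cs, c ≠ 'z') : incB_loop cs suffix = incA_rec cs ++ suffix := by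
  induction cs using List.reverseRecOn generalizing suffix with
  | nil => simp at h
  | append_singleton pre c ih =>
    rw [incA_concat, incB_concat]
    by_cases hz : c = 'z'
    · subst hz
      have hpre : ∃ x ∈ pre, x ≠ 'z' := by
        obtain ⟨x, hx, hne⟩ := h
        rcases List.mem_append.mp hx with hx' | hx'
        · exact ⟨x, hx', hne⟩
        · simp at hx'; exact absurd hx' hne
      rw [if_pos rfl, ih _ hpre]
      have h122 : ('z' : Char).toNat = 122 := by decide
      rw [if_neg (by rw [h122]; omega), if_neg (by rw [h122]; omega), if_pos (by rw [h122])]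
      simp
    · have hn : c.toNat ≠ 122 := fun hc => hz (char_eq_of_toNat (by rw [hc]; decide))
      rw [if_neg hz]
      split_ifs <;> first | omega | simp

-- ===== VERDICT (by name: the statement is the Claim_ definition above) =====
theorem increment_letter_by_one_spec : Claim_equal_increment_letter_by_one := by
  intro s _ hpre
  unfold Pre_increment_letter_by_one at hpre
  simp only [List.any_eq_true, bne_iff_ne] at hpre
  unfold Spec_increment_letter_by_one increment_letter_by_one increment_letter_by_one_alt
  rw [incB_eq_incA _ _ hpre, List.append_nil]

@[simp]
theorem increment_letter_by_one_raises : Claim_raises_increment_letter_by_one := by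
  unfold Claim_raises_increment_letter_by_one
  refine ⟨?_, by decide, by decide, ?_⟩
  · intro s _ hr hp
    unfold Pre_increment_letter_by_one at hp
    unfold Raises_increment_letter_by_one at hr
    simp only [List.any_eq_true, bne_iff_ne] at hp
    simp only [List.all_eq_true, beq_iff_eq] at hr
    obtain ⟨c, hc, hne⟩ := hp
    exact hne (hr c hc)
  · show String.ofList (incB_loop ("zz").toList []) = "AA"
    have : ("zz").toList = ['z'] ++ ['z'] := by decide
    rw [this, incB_concat, if_pos rfl,
        show (['z'] : List Char) = [] ++ ['z'] by rfl, incB_concat, if_pos rfl, incB_nil]
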